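-- pv_equiv track=rewrite | github.com/Cheesylicious/dhfplaner | DHF Planer/gui/dialogs/shift_type_dialog.py | validate_time
-- ===== SOURCE A (Python) =====
-- def validate_time(P):
--     if P == "": return True
--     if len(P) > 5 or P.count(':') > 1 or not all(c.isdigit() or c == ':' for c in P): return False
--     if ':' in P:
--         parts = P.split(':')
--         if len(parts) != 2 or len(parts[0]) > 2 or len(parts[1]) > 2: return False
--     elif len(P) > 2:
--         return False
--     return True
-- ===== SOURCE B (Python) =====
-- import re
--
-- _TIME_RE = re.compile(r'\d{0,2}(:\d{0,2})?')
--
-- def validate_time(P):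
--     return _TIME_RE.fullmatch(P) is not None
-- ===== Notes on version B (the rewrite author's own statement) =====
-- stated objective: idiomatic
-- what changed: Replaces A's cascade of length/count/all/split checks with a single anchored regular expression fullmatch of \d{0,2}(:\d{0,2})? (ported as a take-digits / optional-colon / take-digits matcher).
import Mathlib
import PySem

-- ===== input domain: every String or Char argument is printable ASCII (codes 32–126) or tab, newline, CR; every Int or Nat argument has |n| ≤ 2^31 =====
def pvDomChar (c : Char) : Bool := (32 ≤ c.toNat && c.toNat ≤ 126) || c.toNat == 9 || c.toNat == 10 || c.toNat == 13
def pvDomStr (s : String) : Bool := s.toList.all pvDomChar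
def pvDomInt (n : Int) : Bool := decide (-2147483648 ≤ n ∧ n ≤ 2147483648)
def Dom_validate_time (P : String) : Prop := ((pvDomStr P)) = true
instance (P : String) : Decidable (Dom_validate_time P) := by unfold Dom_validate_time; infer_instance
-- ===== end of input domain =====

-- B replaces A's cascade of length/count/all/split checks by one anchored regex fullmatch (idiomatic; same cost).

-- ===== PORT A =====
def validate_time (P : String) : Bool :=
  if P == "" then true
  else if decide (PySem.Str.len P > 5) || decide (PySem.Str.count P ":" > 1)
          || !(P.toList.all (fun c => PySem.Chars.isdigit c || c == ':')) then false
  else if PySem.Str.isIn ":" P then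
    -- P.split(':') with the nonempty literal separator ':' is Chars.splitOn (the sep ≠ "" form)
    match PySem.Chars.splitOn P.toList [':'] with
    | [p0, p1] => if decide (p0.length > 2) || decide (p1.length > 2) then false else true
    | _ => false   -- len(parts) != 2
  else if decide (PySem.Str.len P > 2) then false
  else true

-- ===== PORT B =====
-- Hand port of re.fullmatch(r'\d{0,2}(:\d{0,2})?', P): up to two digits, then optionally a
-- colon followed by up to two digits, and nothing else.  Exact on the ASCII domain, where \d
-- is '0'..'9' (= PySem.Chars.isdigit); the greedy \d{0,2} is matched by taking the whole
-- leading digit run and bounding its length (digits and ':' are disjoint, so no backtracking).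
def validate_time_alt (P : String) : Bool :=
  let l := P.toList
  decide ((l.takeWhile PySem.Chars.isdigit).length ≤ 2) &&
    (match l.dropWhile PySem.Chars.isdigit with
     | [] => true
     | c :: t => c == ':' && t.all PySem.Chars.isdigit && decide (t.length ≤ 2))

-- ===== PRECONDITION & SPEC =====
def Spec_validate_time (P : String) (out : Bool) : Prop := out = validate_time_alt P
instance (P : String) (out : Bool) : Decidable (Spec_validate_time P out) := by unfold Spec_validate_time; infer_instance

-- ===== CLAIM (what is proved, stated in full; the proofs are below) =====
def Claim_equal_validate_time : Prop := ∀ (P : String), Dom_validate_time P → Spec_validate_time P (validate_time P)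

-- ===== LEMMAS AND PROOFS =====

-- Python's s.count(sub) for a one-character sub is the plain character count.
theorem count_go_singleton (c : Char) (l : List Char) (fuel acc : Nat)
    (h : l.length ≤ fuel) :
    PySem.Chars.count.go [c] fuel l acc = acc + l.count c := by
  induction l generalizing fuel acc with
  | nil => cases fuel <;> simp [PySem.Chars.count.go]
  | cons a t ih =>
    cases fuel with
    | zero => simp at h
    | succ f =>
      have hf : t.length ≤ f := by simpa using h
      by_cases hac : c = a
      · subst hac
        have hpre : [c].isPrefixOf (c :: t) = true := by simp [List.isPrefixOf]
        simp only [PySem.Chars.count.go, hpre, if_true]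
        rw [show List.drop [c].length (c :: t) = t from by simp]
        rw [ih f (acc + 1) hf, List.count_cons]
        simp; omega
      · have hpre : [c].isPrefixOf (a :: t) = false := by
          simp [List.isPrefixOf]; exact fun h' => hac h'
        simp only [PySem.Chars.count.go, hpre, Bool.false_eq_true, if_false]
        rw [ih f acc hf, List.count_cons]
        simp [Ne.symm hac]

theorem count_singleton (c : Char) (l : List Char) :
    PySem.Chars.count l [c] = l.count c := by
  simpa [PySem.Chars.count] using count_go_singleton c l l.length 0 le_rfl

theorem splitOn_go_no_sep (t : List Char) (fuel : Nat) (cur : List Char)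
    (acc : List (List Char)) (ht : ':' ∉ t) (hf : t.length ≤ fuel) :
    PySem.Chars.splitOn.go [':'] fuel t cur acc
      = ((cur.reverse ++ t) :: acc).reverse := by
  induction t generalizing fuel cur acc with
  | nil => cases fuel <;> simp [PySem.Chars.splitOn.go]
  | cons a t ih =>
    cases fuel with
    | zero => simp at hf
    | succ f =>
      have ha : a ≠ ':' := fun h => ht (by simp [h])
      have hpre : [':'].isPrefixOf (a :: t) = false := by
        simp [List.isPrefixOf]; exact fun h => ha h.symm
      simp only [PySem.Chars.splitOn.go, hpre, Bool.false_eq_true, if_false]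
      rw [ih f (a :: cur) acc (fun h => ht (by simp [h])) (by simpa using hf)]
      simp

-- Python's s.split(':') on a string with exactly one ':' gives the two colon-free parts.
theorem splitOn_two_parts (ds t : List Char) (hds : ':' ∉ ds) (ht : ':' ∉ t) :
    PySem.Chars.splitOn (ds ++ ':' :: t) [':'] = [ds, t] := by
  suffices h : ∀ (ds : List Char) (fuel : Nat) (cur : List Char) (acc : List (List Char)),
      ':' ∉ ds → (ds ++ ':' :: t).length ≤ fuel →
      PySem.Chars.splitOn.go [':'] fuel (ds ++ ':' :: t) cur acc
        = acc.reverse ++ [cur.reverse ++ ds, t] by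
    unfold PySem.Chars.splitOn
    rw [h ds _ [] [] hds (by simp)]
    simp
  intro ds
  induction ds with
  | nil =>
    intro fuel cur acc _ hf
    cases fuel with
    | zero => simp at hf
    | succ f =>
      have hpre : [':'].isPrefixOf (':' :: t) = true := by simp [List.isPrefixOf]
      simp only [List.nil_append, PySem.Chars.splitOn.go, hpre, if_true]
      rw [show List.drop [':'].length (':' :: t) = t from by simp]
      rw [splitOn_go_no_sep t f [] (cur.reverse :: acc) ht (by simpa using hf)]
      simp
  | cons d ds ih =>
    intro fuel cur acc hd hf
    cases fuel with
    | zero => simp at hf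
    | succ f =>
      have hdc : d ≠ ':' := fun h => hd (by simp [h])
      have hpre : [':'].isPrefixOf (d :: (ds ++ ':' :: t)) = false := by
        simp [List.isPrefixOf]; exact fun h => hdc h.symm
      simp only [List.cons_append, PySem.Chars.splitOn.go, hpre, Bool.false_eq_true, if_false]
      rw [ih f (d :: cur) acc (fun h => hd (by simp [h])) (by simp at hf ⊢; omega)]
      simp

theorem isIn_singleton (c : Char) (l : List Char) :
    PySem.Chars.isIn [c] l = l.contains c := by
  by_cases h : c ∈ l
  · obtain ⟨s, t, rfl⟩ := List.append_of_mem h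
    rw [(PySem.Chars.isIn_iff_infix [c] (s ++ c :: t)).mpr ⟨s, t, by simp⟩]
    simp [h]
  · have hb : PySem.Chars.isIn [c] l = false := by
      rw [Bool.eq_false_iff]
      intro hb
      exact h (((PySem.Chars.isIn_iff_infix [c] l).mp hb).subset (by simp))
    simp [hb, h]

theorem main_lemma (P : String) : validate_time P = validate_time_alt P := by
  unfold validate_time validate_time_alt
  by_cases hP : P = ""
  · subst hP; rfl
  have hbeq : (P == "") = false := by simp [hP]
  have hcolon : (":" : String).toList = [':'] := rfl
  have hL : P.toList.length = P.length := String.length_toList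
  simp only [hbeq, Bool.false_eq_true, if_false, PySem.Str.len_eq, PySem.Str.count_eq,
    PySem.Str.isIn_eq, hcolon, count_singleton, isIn_singleton]
  rcases hrest : P.toList.dropWhile PySem.Chars.isdigit with _ | ⟨c, t⟩
  · -- the whole string is digits
    have hall : ∀ x ∈ P.toList, PySem.Chars.isdigit x = true := List.dropWhile_eq_nil_iff.mp hrest
    have htake : P.toList.takeWhile PySem.Chars.isdigit = P.toList := by
      conv_rhs => rw [← List.takeWhile_append_dropWhile (p := PySem.Chars.isdigit) (l := P.toList)]
      rw [hrest, List.append_nil]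
    have hnc : ':' ∉ P.toList := fun h => by simpa [PySem.Chars.isdigit] using hall ':' h
    have hcount : P.toList.count ':' = 0 := List.count_eq_zero.mpr hnc
    have hallb : (P.toList.all fun c => PySem.Chars.isdigit c || c == ':') = true := by
      simp only [List.all_eq_true]
      intro x hx; simp [hall x hx]
    have hcontains : P.toList.contains ':' = false := by simpa using hnc
    rw [htake, hcount, hallb, hcontains]
    by_cases h2 : P.toList.length ≤ 2
    · have ha : ¬ ((P.toList.length : Int) > 5) := by push_cast; omega
      have hb : ¬ ((P.toList.length : Int) > 2) := by push_cast; omega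
      simp only [ha, hb, h2, decide_true, decide_false, Bool.false_or, Bool.or_false,
        Bool.not_true, Bool.false_eq_true, if_false]
      simp
    · have hb : ((P.toList.length : Int) > 2) := by push_cast; omega
      by_cases ha : ((P.toList.length : Int) > 5) <;>
        simp only [ha, hb, h2, decide_true, decide_false, Bool.true_or, Bool.or_true,
          Bool.or_false, Bool.false_or, Bool.not_true, if_true, if_false] <;> simp [h2]
  · -- the digit run stops at c
    have hc : PySem.Chars.isdigit c = false := by
      have := List.head_dropWhile_not PySem.Chars.isdigit (l := P.toList) (by simp [hrest])
      simpa [hrest] using this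
    set ds := P.toList.takeWhile PySem.Chars.isdigit with hdsdef
    have hdecomp : ds ++ c :: t = P.toList := by
      conv_rhs => rw [← List.takeWhile_append_dropWhile (p := PySem.Chars.isdigit) (l := P.toList)]
      rw [hrest]
    have hds : ∀ x ∈ ds, PySem.Chars.isdigit x = true := fun x hx => List.mem_takeWhile_imp hx
    by_cases hcc : c = ':'
    · subst hcc
      by_cases hta : ∀ x ∈ t, PySem.Chars.isdigit x = true
      · -- well-shaped: digits, one colon, digits
        have hnds : ':' ∉ ds := fun h => by simpa [PySem.Chars.isdigit] using hds ':' h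
        have hnt : ':' ∉ t := fun h => by simpa [PySem.Chars.isdigit] using hta ':' h
        have hcount : P.toList.count ':' = 1 := by
          rw [← hdecomp, List.count_append, List.count_cons]
          simp [List.count_eq_zero.mpr hnds, List.count_eq_zero.mpr hnt]
        have hallb : (P.toList.all fun c => PySem.Chars.isdigit c || c == ':') = true := by
          rw [← hdecomp]
          simp only [List.all_append, List.all_cons, List.all_eq_true, Bool.and_eq_true]
          refine ⟨fun x hx => by simp [hds x hx], by simp, fun x hx => by simp [hta x hx]⟩
        have hcontains : P.toList.contains ':' = true := by
          rw [← hdecomp]; simp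
        have hsplit : PySem.Chars.splitOn P.toList [':'] = [ds, t] := by
          rw [← hdecomp]
          exact splitOn_two_parts ds t hnds hnt
        have hlen : P.toList.length = ds.length + 1 + t.length := by
          rw [← hdecomp]; simp; omega
        rw [hcount, hallb, hcontains, hsplit]
        have htall : t.all PySem.Chars.isdigit = true := List.all_eq_true.mpr hta
        have h1 : ¬ ((1 : Nat) > 1) := by omega
        by_cases hd2 : ds.length ≤ 2
        · by_cases ht2 : t.length ≤ 2
          · have h5 : ¬ ((P.toList.length : Int) > 5) := by rw [hlen]; push_cast; omega
            have hd2' : ¬ (ds.length > 2) := by omega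
            have ht2' : ¬ (t.length > 2) := by omega
            simp [h5, h1, hd2, ht2, hd2', ht2', htall] <;> omega
          · have ht2' : (t.length > 2) := by omega
            by_cases h5 : ((P.toList.length : Int) > 5) <;>
              simp [h5, h1, ht2, ht2', htall]
        · have hd2' : (ds.length > 2) := by omega
          by_cases h5 : ((P.toList.length : Int) > 5) <;>
            simp [h5, h1, hd2, hd2', htall]
      · -- a non-digit after the colon: both reject
        push_neg at hta
        obtain ⟨x, hxt, hx⟩ := hta
        have hx' : PySem.Chars.isdigit x = false := by simpa using hx
        have hBfalse : (t.all PySem.Chars.isdigit) = false := by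
          rw [List.all_eq_false]; exact ⟨x, hxt, by simp [hx']⟩
        have hcond : (decide ((P.toList.length : Int) > 5)
            || decide (P.toList.count ':' > 1)
            || !(P.toList.all fun c => PySem.Chars.isdigit c || c == ':')) = true := by
          by_cases hxc : x = ':'
          · subst hxc
            have h2 : P.toList.count ':' ≥ 2 := by
              rw [← hdecomp, List.count_append, List.count_cons]
              have := List.count_pos_iff.mpr hxt
              simp; omega
            have : (P.toList.count ':' > 1) := by omega
            simp [this]
          · have : (P.toList.all fun c => PySem.Chars.isdigit c || c == ':') = false := by
              rw [List.all_eq_false]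
              refine ⟨x, ?_, by simp [hx', hxc]⟩
              rw [← hdecomp]; simp [hxt]
            simp [this]
        simp [hBfalse]
        intro h5 hcnt hdig
        exfalso
        simp only [Bool.or_eq_true, decide_eq_true_eq, Bool.not_eq_true', List.all_eq_false] at hcond
        rcases hcond with (h | h) | h
        · rw [hL] at h; omega
        · omega
        · obtain ⟨y, hy, hyf⟩ := h
          have h1 : PySem.Chars.isdigit y = false := by
            rcases Bool.eq_false_or_eq_true (PySem.Chars.isdigit y) with hh | hh
            · exact absurd (Or.inl hh) hyf
            · exact hh
          exact hyf (Or.inr (by simp [hdig y hy h1]))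
    · -- a character that is neither digit nor colon: both reject
      have hallf : (P.toList.all fun c => PySem.Chars.isdigit c || c == ':') = false := by
        rw [List.all_eq_false]
        refine ⟨c, ?_, by simp [hc, hcc]⟩
        rw [← hdecomp]; simp
      have hcb : (c == ':') = false := by simp [hcc]
      simp [hallf, hcb]

-- ===== VERDICT (by name: the statement is the Claim_ definition above) =====
theorem validate_time_spec : Claim_equal_validate_time := by
  intro P _
  exact main_lemma P
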